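-- pv_equiv track=rewrite | github.com/audreypots/amumu | main/modules/module1.py | check_valid_hex_val
-- ===== SOURCE A (Python) =====
-- def check_valid_hex_val(string_value):
--     """
--     check for valid hex values
--     0-9 and A-F and a-f
--     """
--     return_value = "valid"
--     letter_index = 0
--     for letter_in_string_value in string_value:
--         letter_index += 1
--         if(letter_in_string_value >= "0" and letter_in_string_value <= "9"):
--             continue
--         elif(letter_in_string_value >= "A" and letter_in_string_value <= "F"):
--             continue
--         elif(letter_in_string_value >= "a" and letter_in_string_value <= "f"):
--             continue
--         else:
--             return_value = "Invalid Hex Value[" + letter_in_string_value + "] at location[" + str(letter_index) + "]"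
--             break
--     return return_value
-- ===== SOURCE B (Python) =====
-- HEX_DIGITS = "0123456789ABCDEFabcdef"
--
-- def check_valid_hex_val(string_value):
--     rest = string_value.lstrip(HEX_DIGITS)
--     if not rest:
--         return "valid"
--     pos = len(string_value) - len(rest) + 1
--     return "Invalid Hex Value[" + rest[0] + "] at location[" + str(pos) + "]"
-- ===== Notes on version B (the rewrite author's own statement) =====
-- stated objective: idiomatic
-- what changed: Instead of A's indexed scan with a three-way range ladder and break, B strips the maximal hex-digit prefix with str.lstrip and derives the offending character and its 1-based location from the remaining suffix by length arithmetic.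
import Mathlib
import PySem

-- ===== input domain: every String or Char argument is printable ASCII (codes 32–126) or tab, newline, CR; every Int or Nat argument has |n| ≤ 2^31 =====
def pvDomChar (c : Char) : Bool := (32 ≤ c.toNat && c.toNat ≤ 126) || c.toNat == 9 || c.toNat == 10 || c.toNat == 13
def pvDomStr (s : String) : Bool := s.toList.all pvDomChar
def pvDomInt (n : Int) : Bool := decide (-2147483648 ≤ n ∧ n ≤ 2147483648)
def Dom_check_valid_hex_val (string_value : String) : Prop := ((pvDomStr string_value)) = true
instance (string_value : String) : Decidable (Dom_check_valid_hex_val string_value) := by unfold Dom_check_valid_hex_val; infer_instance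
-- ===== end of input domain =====

-- ===== PORT A =====
-- B replaces A's indexed scan-and-break with an lstrip of the hex-digit prefix plus length arithmetic (idiomatic).
-- A's loop: letter_index incremented first, three contiguous-range tests, break with message on failure
def checkA_loop : List Char → Int → String
  | [], _ => "valid"
  | c :: rest, letter_index =>
    if '0' ≤ c ∧ c ≤ '9' then checkA_loop rest (letter_index + 1)
    else if 'A' ≤ c ∧ c ≤ 'F' then checkA_loop rest (letter_index + 1)
    else if 'a' ≤ c ∧ c ≤ 'f' then checkA_loop rest (letter_index + 1)
    else "Invalid Hex Value[" ++ String.singleton c ++ "] at location[" ++ PySem.Int.toStr (letter_index + 1) ++ "]"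

def check_valid_hex_val (string_value : String) : String :=
  checkA_loop string_value.toList 0

-- ===== PORT B =====
-- the characters of Source B's HEX_DIGITS string
def hexDigits : List Char :=
  ['0','1','2','3','4','5','6','7','8','9','A','B','C','D','E','F','a','b','c','d','e','f']

-- string_value.lstrip(HEX_DIGITS) removes the longest prefix of characters from HEX_DIGITS:
-- exactly List.dropWhile (contains) on the character list; rest[0] is the head of the suffix,
-- len(rest) = r.length + 1, and pos = len(string_value) - len(rest) + 1.
def check_valid_hex_val_alt (string_value : String) : String :=
  match string_value.toList.dropWhile (fun c => hexDigits.contains c) with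
  | [] => "valid"
  | c :: r =>
    "Invalid Hex Value[" ++ String.singleton c ++ "] at location[" ++
      PySem.Int.toStr ((string_value.toList.length : Int) - ((r.length : Int) + 1) + 1) ++ "]"

-- ===== PRECONDITION & SPEC =====
def Spec_check_valid_hex_val (string_value : String) (out : String) : Prop := out = check_valid_hex_val_alt string_value
instance (string_value : String) (out : String) : Decidable (Spec_check_valid_hex_val string_value out) := by unfold Spec_check_valid_hex_val; infer_instance

-- ===== CLAIM (what is proved, stated in full; the proofs are below) =====
def Claim_equal_check_valid_hex_val : Prop := ∀ (string_value : String), Dom_check_valid_hex_val string_value → Spec_check_valid_hex_val string_value (check_valid_hex_val string_value)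

-- ===== LEMMAS AND PROOFS =====

theorem hex_mem_iff (c : Char) :
    c ∈ hexDigits ↔ (('0' ≤ c ∧ c ≤ '9') ∨ ('A' ≤ c ∧ c ≤ 'F') ∨ ('a' ≤ c ∧ c ≤ 'f')) := by
  simp only [hexDigits, List.mem_cons, List.not_mem_nil, or_false, Char.le_def,
    UInt32.le_iff_toNat_le, Char.ext_iff, ← UInt32.toNat_inj,
    show ('0' : Char).val.toNat = 48 from rfl, show ('1' : Char).val.toNat = 49 from rfl, show ('2' : Char).val.toNat = 50 from rfl, show ('3' : Char).val.toNat = 51 from rfl, show ('4' : Char).val.toNat = 52 from rfl, show ('5' : Char).val.toNat = 53 from rfl, show ('6' : Char).val.toNat = 54 from rfl, show ('7' : Char).val.toNat = 55 from rfl, show ('8' : Char).val.toNat = 56 from rfl, show ('9' : Char).val.toNat = 57 from rfl, show ('a' : Char).val.toNat = 97 from rfl, show ('b' : Char).val.toNat = 98 from rfl, show ('c' : Char).val.toNat = 99 from rfl, show ('d' : Char).val.toNat = 100 from rfl, show ('e' : Char).val.toNat = 101 from rfl, show ('f' : Char).val.toNat = 102 from rfl, show ('A' : Char).val.toNat = 65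 from rfl, show ('B' : Char).val.toNat = 66 from rfl, show ('C' : Char).val.toNat = 67 from rfl, show ('D' : Char).val.toNat = 68 from rfl, show ('E' : Char).val.toNat = 69 from rfl, show ('F' : Char).val.toNat = 70 from rfl]
  omega

theorem loop_agree (l : List Char) (i : Int) :
    checkA_loop l i =
      (match l.dropWhile (fun c => hexDigits.contains c) with
       | [] => "valid"
       | c :: r =>
         "Invalid Hex Value[" ++ String.singleton c ++ "] at location[" ++
           PySem.Int.toStr (i + (l.length : Int) - ((r.length : Int) + 1) + 1) ++ "]") := by
  induction l generalizing i with
  | nil => rfl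
  | cons c rest ih =>
    by_cases h : c ∈ hexDigits
    · have h' := hex_mem_iff c |>.mp h
      have hdw : (c :: rest).dropWhile (fun c => hexDigits.contains c)
          = rest.dropWhile (fun c => hexDigits.contains c) := by
        simp [List.dropWhile, h]
      rw [hdw]
      have hlen : ∀ r' : List Char,
          (i + 1) + (rest.length : Int) - ((r'.length : Int) + 1) + 1
            = i + ((c :: rest).length : Int) - ((r'.length : Int) + 1) + 1 := by
        intro r'; simp only [List.length_cons]; push_cast; ring
      have hstep : checkA_loop (c :: rest) i = checkA_loop rest (i + 1) := by
        simp only [checkA_loop]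
        by_cases d1 : ('0' ≤ c ∧ c ≤ '9')
        · rw [if_pos d1]
        · rw [if_neg d1]
          by_cases d2 : ('A' ≤ c ∧ c ≤ 'F')
          · rw [if_pos d2]
          · rw [if_neg d2, if_pos ((h'.resolve_left d1).resolve_left d2)]
      rw [hstep, ih (i + 1)]
      cases rest.dropWhile (fun c => hexDigits.contains c) with
      | nil => rfl
      | cons d r' => simp only [hlen r']
    · have h' := (hex_mem_iff c).not.mp h
      obtain ⟨h1, h2, h3⟩ : ¬('0' ≤ c ∧ c ≤ '9') ∧ ¬('A' ≤ c ∧ c ≤ 'F') ∧ ¬('a' ≤ c ∧ c ≤ 'f') := by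
        tauto
      have hdw : (c :: rest).dropWhile (fun c => hexDigits.contains c) = c :: rest := by
        simp [List.dropWhile, h]
      rw [hdw]
      simp only [checkA_loop]
      rw [if_neg h1, if_neg h2, if_neg h3]
      have : i + ((c :: rest).length : Int) - ((rest.length : Int) + 1) + 1 = i + 1 := by
        simp only [List.length_cons]; push_cast; ring
      rw [this]

-- ===== VERDICT (by name: the statement is the Claim_ definition above) =====
theorem check_valid_hex_val_spec : Claim_equal_check_valid_hex_val := by
  intro s _
  unfold Spec_check_valid_hex_val check_valid_hex_val check_valid_hex_val_alt
  rw [loop_agree s.toList 0]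
  cases s.toList.dropWhile (fun c => hexDigits.contains c) with
  | nil => rfl
  | cons d r =>
    have : (0 : Int) + (s.toList.length : Int) - ((r.length : Int) + 1) + 1
        = (s.toList.length : Int) - ((r.length : Int) + 1) + 1 := by ring
    simp only [this]
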